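-- pv_equiv track=rewrite | github.com/gabesenese/A.L.I.C.E | ai/conversation_summarizer.py | _analyze_sentiment_trend
-- ===== SOURCE A (Python) =====
-- from typing import Dict, List, Optional, Any, Tuple
--
-- def _analyze_sentiment_trend(turns: List[Dict]) -> str:
--     """Analyze overall sentiment trend of the conversation"""
--     sentiments = []
--
--     for turn in turns:
--         sentiment = turn.get("sentiment")
--         if sentiment:
--             sentiments.append(sentiment)
--
--     if not sentiments:
--         return "neutral"
--
--     # Simple sentiment aggregation
--     positive_count = sentiments.count("positive")
--     negative_count = sentiments.count("negative")
--
--     if positive_count > negative_count: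
--         return "positive"
--     elif negative_count > positive_count:
--         return "negative"
--     else:
--         return "neutral"
-- ===== SOURCE B (Python) =====
-- def _analyze_sentiment_trend(turns):
--     """Analyze overall sentiment trend of the conversation"""
--     def net(ts):
--         if not ts:
--             return 0
--         s = ts[0].get("sentiment")
--         d = 1 if s == "positive" else (-1 if s == "negative" else 0)
--         return d + net(ts[1:])
--     score = net(turns)
--     if score > 0:
--         return "positive"
--     if score < 0:
--         return "negative"
--     return "neutral"
-- ===== Notes on version B (the rewrite author's own statement) =====
-- stated objective: alternative
-- what changed: Replaces the materialized sentiments list plus two separate .count() scans by a recursive helper computing one net +1/-1 tally whose sign decides the result.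
import Mathlib
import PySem

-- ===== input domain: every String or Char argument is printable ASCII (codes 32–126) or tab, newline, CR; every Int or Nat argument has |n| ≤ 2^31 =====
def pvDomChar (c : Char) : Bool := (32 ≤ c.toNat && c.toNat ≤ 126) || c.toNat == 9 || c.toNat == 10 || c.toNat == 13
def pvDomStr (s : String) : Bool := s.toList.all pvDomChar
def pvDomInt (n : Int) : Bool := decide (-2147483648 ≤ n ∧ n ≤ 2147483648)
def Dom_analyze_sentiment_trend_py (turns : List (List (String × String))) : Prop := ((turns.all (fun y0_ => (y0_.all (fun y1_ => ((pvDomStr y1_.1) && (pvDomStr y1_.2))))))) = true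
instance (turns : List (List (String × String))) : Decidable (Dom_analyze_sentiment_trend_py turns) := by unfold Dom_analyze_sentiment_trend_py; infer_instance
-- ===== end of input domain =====

-- B replaces the sentiments list and two .count() scans by a recursive net ±1 tally; objective: alternative decomposition.

-- ===== PORT A =====
-- sentiments list built by the for-loop (truthiness: a non-empty string sentiment is appended)
def pvSentimentsA (turns : List (List (String × String))) : List String :=
  turns.foldl (fun acc turn =>
    match (PySem.Dict.mk turn).get? "sentiment" with
    | some s => if s ≠ "" then acc ++ [s] else acc
    | none => acc) []

def analyze_sentiment_trend_py (turns : List (List (String × String))) : String :=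
  let sentiments := pvSentimentsA turns
  if sentiments = [] then "neutral"
  else
    let positive_count := sentiments.count "positive"
    let negative_count := sentiments.count "negative"
    if positive_count > negative_count then "positive"
    else if negative_count > positive_count then "negative"
    else "neutral"

-- ===== PORT B =====
-- B's recursive helper net(ts)
def pvNetB : List (List (String × String)) → Int
  | [] => 0
  | t :: rest =>
      (let s := (PySem.Dict.mk t).get? "sentiment"
       let d : Int := if s = some "positive" then 1 else if s = some "negative" then -1 else 0
       d) + pvNetB rest

def analyze_sentiment_trend_py_alt (turns : List (List (String × String))) : String :=
  let score := pvNetB turns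
  if score > 0 then "positive"
  else if score < 0 then "negative"
  else "neutral"

-- ===== PRECONDITION & SPEC =====
def Spec_analyze_sentiment_trend_py (turns : List (List (String × String))) (out : String) : Prop := out = analyze_sentiment_trend_py_alt turns
instance (turns : List (List (String × String))) (out : String) : Decidable (Spec_analyze_sentiment_trend_py turns out) := by unfold Spec_analyze_sentiment_trend_py; infer_instance

-- ===== CLAIM =====
def Claim_equal_analyze_sentiment_trend_py : Prop := ∀ (turns : List (List (String × String))), Dom_analyze_sentiment_trend_py turns → Spec_analyze_sentiment_trend_py turns (analyze_sentiment_trend_py turns)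

-- ===== LEMMAS AND PROOFS =====

-- net count of a sentiments list
def pvCnt (l : List String) : Int := (l.count "positive" : Int) - (l.count "negative" : Int)

theorem pvCnt_append (l : List String) (s : String) :
    pvCnt (l ++ [s]) = pvCnt l + (if s = "positive" then 1 else if s = "negative" then -1 else 0) := by
  simp only [pvCnt, List.count_append, List.count_singleton]
  split_ifs with h1 h2 <;> simp_all <;> ring

theorem pvSentimentsA_fold_cnt (turns : List (List (String × String))) (acc : List String) :
    pvCnt (turns.foldl (fun acc turn =>
      match (PySem.Dict.mk turn).get? "sentiment" with
      | some s => if s ≠ "" then acc ++ [s] else acc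
      | none => acc) acc) = pvCnt acc + pvNetB turns := by
  induction turns generalizing acc with
  | nil => simp [pvNetB]
  | cons t rest ih =>
    simp only [List.foldl_cons, pvNetB]
    rw [ih]
    have h1 : pvCnt (match (PySem.Dict.mk t).get? "sentiment" with
        | some s => if s ≠ "" then acc ++ [s] else acc
        | none => acc) = pvCnt acc +
        (if (PySem.Dict.mk t).get? "sentiment" = some "positive" then (1:Int)
         else if (PySem.Dict.mk t).get? "sentiment" = some "negative" then -1 else 0) := by
      cases h : (PySem.Dict.mk t).get? "sentiment" with
      | none => simp
      | some s =>
        by_cases hs : s = "" <;> simp [hs, pvCnt_append]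
    rw [h1]; ring

theorem pvNet_eq_cnt (turns : List (List (String × String))) :
    pvCnt (pvSentimentsA turns) = pvNetB turns := by
  have := pvSentimentsA_fold_cnt turns []
  simpa [pvSentimentsA, pvCnt] using this

-- ===== VERDICT =====
theorem analyze_sentiment_trend_py_spec : Claim_equal_analyze_sentiment_trend_py := by
  intro turns _
  unfold Spec_analyze_sentiment_trend_py analyze_sentiment_trend_py analyze_sentiment_trend_py_alt
  have h := pvNet_eq_cnt turns
  unfold pvCnt at h
  cases hse : pvSentimentsA turns with
  | nil =>
    rw [hse] at h
    simp only [List.count_nil] at h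
    have : pvNetB turns = 0 := by omega
    simp [this]
  | cons a l =>
    rw [hse] at h
    simp only [reduceCtorEq, if_false]
    split_ifs <;> first | rfl | omega
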